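-- pv_equiv track=rewrite | github.com/RMiguel0/t1 | t1.py | resto8
-- ===== SOURCE A (Python) =====
-- def resto8(numero, lista=None):
--     if lista is None:
--         lista = []
--
--     resto = numero % 8
--     lista.append(resto)
--
--     new = numero // 8
--
--     if new == 0:
--         return lista
--     else:
--         return resto8(new, lista)
-- ===== SOURCE B (Python) =====
-- def resto8(numero, lista=None):
--     if lista is None:
--         lista = []
--     lista.extend(int(d) for d in reversed(oct(numero)[2:]))
--     return lista
-- ===== Notes on version B (the rewrite author's own statement) =====
-- stated objective: idiomatic
-- what changed: Replaces the append-per-step tail recursion with a single call to the standard-library octal formatter oct(), whose digit string is reversed, parsed and extended onto the accumulator; no recursion or division loop remains in B.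
import Mathlib
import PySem

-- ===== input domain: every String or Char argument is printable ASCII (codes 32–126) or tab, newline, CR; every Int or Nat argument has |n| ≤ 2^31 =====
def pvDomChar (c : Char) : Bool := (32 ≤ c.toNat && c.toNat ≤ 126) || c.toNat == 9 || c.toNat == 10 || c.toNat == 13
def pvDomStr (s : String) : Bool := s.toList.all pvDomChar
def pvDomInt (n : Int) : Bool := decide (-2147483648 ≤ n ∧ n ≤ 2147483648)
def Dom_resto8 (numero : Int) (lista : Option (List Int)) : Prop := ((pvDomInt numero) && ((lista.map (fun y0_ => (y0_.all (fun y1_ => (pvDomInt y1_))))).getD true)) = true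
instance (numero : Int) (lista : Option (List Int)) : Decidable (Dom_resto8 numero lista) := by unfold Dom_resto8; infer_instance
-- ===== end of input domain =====

-- B replaces A's tail recursion by Python's standard octal formatter (oct) whose digit
-- string is reversed, parsed and extended onto the accumulator (objective: idiomatic).
-- Both A and B mutate the passed-in `lista` in place; the equivalence proved here is
-- about the return value.

-- ===== PORT A =====
-- fuel makes the recursion total in Lean; inside Pre_ (0 ≤ numero) the fuel
-- numero.toNat + 1 is never exhausted, so this computes exactly what A computes.
def resto8Go (fuel : Nat) (numero : Int) (lista : List Int) : List Int :=
  match fuel with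
  | 0 => lista
  | fuel + 1 =>
    let resto := PySem.Int.mod numero 8
    let lista := lista ++ [resto]
    let new := PySem.Int.floordiv numero 8
    if new = 0 then lista else resto8Go fuel new lista

def resto8 (numero : Int) (lista : Option (List Int)) : List Int :=
  resto8Go (numero.toNat + 1) numero (lista.getD [])

-- ===== PORT B =====
-- octChars n = the digit characters of oct(n) after the "0o" prefix, most significant
-- first; exact for the nonnegative numero admitted by Pre_ (Python's oct on them).
def octChars (n : Nat) : List Char :=
  if n < 8 then [Nat.digitChar n]
  else octChars (n / 8) ++ [Nat.digitChar (n % 8)]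
decreasing_by exact Nat.div_lt_self (by omega) (by omega)

-- oct(numero)[2:] reversed, each char parsed with int() (single octal digit, exact)
def resto8_alt (numero : Int) (lista : Option (List Int)) : List Int :=
  lista.getD [] ++ (octChars numero.toNat).reverse.map (fun c => ((c.toNat : Int) - 48))

-- ===== PRECONDITION & SPEC =====
-- A recurses forever on negative numero (RecursionError) — Pre_ excludes exactly those.
def Pre_resto8 (numero : Int) (lista : Option (List Int)) : Prop := 0 ≤ numero
instance (numero : Int) (lista : Option (List Int)) : Decidable (Pre_resto8 numero lista) := by unfold Pre_resto8; infer_instance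
def pvWitness_resto8 : Int × Option (List Int) := (9, some [3])

def Spec_resto8 (numero : Int) (lista : Option (List Int)) (out : List Int) : Prop := out = resto8_alt numero lista
instance (numero : Int) (lista : Option (List Int)) (out : List Int) : Decidable (Spec_resto8 numero lista out) := by unfold Spec_resto8; infer_instance

-- ===== CLAIM (what is proved, stated in full; the proofs are below) =====
def Claim_equal_resto8 : Prop := ∀ (numero : Int) (lista : Option (List Int)), Dom_resto8 numero lista → Pre_resto8 numero lista → Spec_resto8 numero lista (resto8 numero lista)

-- ===== LEMMAS AND PROOFS =====

theorem digitChar_val (d : Nat) (hd : d < 8) :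
    ((Nat.digitChar d).toNat : Int) - 48 = (d : Int) := by
  interval_cases d <;> decide

theorem go_eq (fuel : Nat) : ∀ (n : Nat) (acc : List Int), n < fuel →
    resto8Go fuel (n : Int) acc = acc ++ (octChars n).reverse.map (fun c => ((c.toNat : Int) - 48)) := by
  induction fuel with
  | zero => intro n acc h; omega
  | succ fuel ih =>
    intro n acc h
    have hmod : PySem.Int.mod (n : Int) 8 = ((n % 8 : Nat) : Int) := by
      exact_mod_cast PySem.Int.mod_natCast n 8
    have hdiv : PySem.Int.floordiv (n : Int) 8 = ((n / 8 : Nat) : Int) := by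
      exact_mod_cast PySem.Int.floordiv_natCast n 8
    by_cases hn : n < 8
    · have hq : n / 8 = 0 := Nat.div_eq_of_lt hn
      have hm : n % 8 = n := Nat.mod_eq_of_lt hn
      rw [resto8Go]
      simp only [hmod, hdiv, hq, Nat.cast_zero]
      rw [octChars]
      simp [hn, hm, digitChar_val n hn]
    · have hq : ¬ ((n / 8 : Nat) : Int) = 0 := by
        have : 1 ≤ n / 8 := Nat.le_div_iff_mul_le (by omega) |>.mpr (by omega)
        omega
      have hlt : n / 8 < fuel := by
        have := Nat.div_lt_self (n := n) (by omega) (by omega : 1 < 8)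
        omega
      rw [resto8Go]
      simp only [hmod, hdiv, hq]
      rw [ih (n / 8) _ hlt]
      conv_rhs => rw [octChars]
      simp [hn, digitChar_val (n % 8) (Nat.mod_lt n (by omega))]

-- ===== VERDICT (by name: the statement is the Claim_ definition above) =====
theorem resto8_spec : Claim_equal_resto8 := by
  intro numero lista _ hpre
  unfold Pre_resto8 at hpre
  obtain ⟨m, rfl⟩ : ∃ m : Nat, numero = (m : Int) := ⟨numero.toNat, by omega⟩
  unfold Spec_resto8 resto8 resto8_alt
  simp only [Int.toNat_natCast]
  exact go_eq (m + 1) m (lista.getD []) (by omega)
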